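-- pv_equiv track=rewrite | github.com/hitechparadigm/Python-3-Programming | 2. Python Functions, Files, and Dictionaries/course_2_assessment_6.py | beginning
-- ===== SOURCE A (Python) =====
-- def beginning(input_list):
--     idx = 0
--     output_list = []
--     while idx < len(input_list):
--         if input_list[idx] != "bye":
--             output_list.append(input_list[idx])
--             idx += 1
--         else:
--             break
--     return output_list[:10]
-- ===== SOURCE B (Python) =====
-- def beginning(input_list):
--     end = input_list.index("bye") if "bye" in input_list else len(input_list)
--     return input_list[:min(end, 10)]
-- ===== Notes on version B (the rewrite author's own statement) =====
-- stated objective: simpler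
-- what changed: Replaces the index-driven while loop with element-by-element append and break by computing the cut-off index (first 'bye' position, or the list length if absent) and returning a single capped slice input_list[:min(end,10)].
import Mathlib
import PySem

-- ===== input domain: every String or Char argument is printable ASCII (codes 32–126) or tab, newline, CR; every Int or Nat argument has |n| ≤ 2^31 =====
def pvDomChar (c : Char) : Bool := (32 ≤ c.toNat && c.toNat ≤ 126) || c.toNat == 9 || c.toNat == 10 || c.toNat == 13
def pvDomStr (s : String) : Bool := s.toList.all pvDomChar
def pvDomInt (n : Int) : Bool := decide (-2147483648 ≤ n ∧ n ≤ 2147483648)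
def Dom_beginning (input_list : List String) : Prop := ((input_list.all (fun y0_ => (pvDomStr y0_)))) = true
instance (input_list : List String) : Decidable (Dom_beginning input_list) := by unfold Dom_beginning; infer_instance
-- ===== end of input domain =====

-- B replaces A's append-and-break while loop with a computed cut-off index and one capped slice (objective: simpler).

-- ===== PORT A =====
-- the while loop: walk the list, appending each element until "bye" (break) or the end
def beginningLoop : List String → List String → List String
  | [], acc => acc
  | x :: rest, acc => if x ≠ "bye" then beginningLoop rest (acc ++ [x]) else acc

def beginning (input_list : List String) : List String :=
  PySem.List.slice (beginningLoop input_list []) none (some 10)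

-- ===== PORT B =====
def beginning_alt (input_list : List String) : List String :=
  let e : Nat := if "bye" ∈ input_list then (PySem.List.index? input_list "bye").getD 0
                 else input_list.length
  PySem.List.slice input_list none (some (min (e : Int) 10))

-- ===== PRECONDITION & SPEC =====
def Spec_beginning (input_list : List String) (out : List String) : Prop := out = beginning_alt input_list
instance (input_list : List String) (out : List String) : Decidable (Spec_beginning input_list out) := by unfold Spec_beginning; infer_instance

-- ===== CLAIM (what is proved, stated in full; the proofs are below) =====
def Claim_equal_beginning : Prop := ∀ (input_list : List String), Dom_beginning input_list → Spec_beginning input_list (beginning input_list)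

-- ===== LEMMAS AND PROOFS =====

theorem beginningLoop_eq (xs acc : List String) :
    beginningLoop xs acc = acc ++ xs.takeWhile (fun s => s ≠ "bye") := by
  induction xs generalizing acc with
  | nil => simp [beginningLoop]
  | cons x rest ih =>
      by_cases hx : x = "bye"
      · simp [beginningLoop, hx]
      · simp [beginningLoop, hx, ih]

theorem alt_take (xs : List String) :
    beginning_alt xs = xs.take (min (xs.takeWhile (fun s => s ≠ "bye")).length 10) := by
  unfold beginning_alt
  by_cases h : "bye" ∈ xs
  · simp only [h, if_pos]
    obtain ⟨k, hk⟩ := (PySem.List.index?_isSome_iff xs "bye").2 h |> Option.isSome_iff_exists.1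
    rw [hk]
    have : ((min k 10 : Nat) : Int) = min (k : Int) 10 := by push_cast; rfl
    simp only [Option.getD_some, ← this, PySem.List.slice_to_natCast]
    congr 1
    -- k = length of the takeWhile prefix
    obtain ⟨pre, suf, hdecomp, hlen, hnot⟩ := (PySem.List.index?_eq_some_iff xs "bye" k).1 hk
    subst hdecomp
    rw [← hlen]
    congr 1
    rw [List.takeWhile_append]
    have hp : ∀ s ∈ pre, (fun s => decide (s ≠ "bye")) s = true := by
      intro s hs; simp; rintro rfl; exact hnot hs
    rw [List.takeWhile_eq_self_iff.2 hp]
    simp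
  · simp only [h, if_neg, not_false_iff]
    have hself : xs.takeWhile (fun s => s ≠ "bye") = xs := by
      apply List.takeWhile_eq_self_iff.2
      intro s hs; simp; rintro rfl; exact h hs
    have : ((min xs.length 10 : Nat) : Int) = min (xs.length : Int) 10 := by push_cast; rfl
    rw [← this, PySem.List.slice_to_natCast, hself]

-- ===== VERDICT (by name: the statement is the Claim_ definition above) =====
theorem beginning_spec : Claim_equal_beginning := by
  intro xs _
  show beginning xs = beginning_alt xs
  rw [alt_take, beginning, beginningLoop_eq]
  rw [show (10 : Int) = ((10 : Nat) : Int) from rfl, PySem.List.slice_to_natCast]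
  have hpre : xs.takeWhile (fun s => s ≠ "bye") =
      xs.take (xs.takeWhile (fun s => s ≠ "bye")).length :=
    (List.prefix_iff_eq_take.1 (List.takeWhile_prefix _))
  conv_lhs => rw [hpre]
  simp [List.take_take, Nat.min_comm]
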